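-- pv_equiv track=rewrite | github.com/ronit127/formal-regular-expressions | main.py | crush_epsilon
-- ===== SOURCE A (Python) =====
-- def crush_epsilon(reg_expr):
--     result = []
--     for i, char in enumerate(reg_expr):
--         if char == 'e':
--             if i > 1 and reg_expr[i-1] in ["(", "+"]:
--                 if i < len(reg_expr) - 1 and reg_expr[i+1] in [")", "+"]:
--                     result.append(char)
--         else: result.append(char)
--     return ''.join(result)
-- ===== SOURCE B (Python) =====
-- def crush_epsilon(reg_expr):
--     # Split on 'e': every boundary between adjacent parts is one candidate 'e',
--     # kept only when bracketed by '('/'+' on the left and ')'/'+' on the right.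
--     parts = reg_expr.split('e')
--     out = [parts[0]]
--     prev = parts[0]
--     for nxt in parts[1:]:
--         if prev[-1:] in ("(", "+") and nxt[:1] in (")", "+"):
--             out.append('e')
--         out.append(nxt)
--         prev = nxt
--     return ''.join(out)
-- ===== Notes on version B (the rewrite author's own statement) =====
-- stated objective: idiomatic
-- what changed: Replaces the indexed per-character loop with manual reg_expr[i-1]/reg_expr[i+1] lookups by split('e')/join: the string is split on 'e' and each boundary between adjacent parts is kept or dropped from its neighbouring parts' edge characters, with no indexing or length arithmetic.
-- intended difference: On strings whose character at index 1 is an 'e' preceded by '(' or '+' and followed by ')' or '+' (e.g. '(e)'), A's off-by-one guard i > 1 (where i >= 1 suffices for the i-1 lookup) drops that epsilon and returns e.g. '()', while B keeps it and returns '(e)', the intended value since the same epsilon is kept at every later position (A keeps it in 'a(e)'). — e.g. on crush_epsilon("(e)"): A returns "()", B returns "(e)"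
import Mathlib
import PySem

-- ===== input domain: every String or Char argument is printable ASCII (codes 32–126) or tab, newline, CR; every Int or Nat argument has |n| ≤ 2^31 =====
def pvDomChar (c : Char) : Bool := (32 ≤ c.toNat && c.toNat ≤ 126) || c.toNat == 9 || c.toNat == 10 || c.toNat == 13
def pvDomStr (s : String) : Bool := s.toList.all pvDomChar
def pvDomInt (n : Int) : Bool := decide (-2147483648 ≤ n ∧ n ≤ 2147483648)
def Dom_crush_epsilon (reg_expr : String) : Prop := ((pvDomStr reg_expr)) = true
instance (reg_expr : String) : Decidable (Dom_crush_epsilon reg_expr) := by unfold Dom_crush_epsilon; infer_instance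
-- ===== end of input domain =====

-- B replaces A's indexed per-character loop (manual reg_expr[i-1]/reg_expr[i+1] lookups)
-- by split('e')/join over the boundaries between parts (idiomatic; same O(n) cost).
-- Intended difference: on strings with an 'e' at index 1 between '('/'+' and ')'/'+',
-- A's off-by-one guard 'i > 1' drops the epsilon; B keeps it (see D_crush_epsilon).


-- ===== PORT A =====
-- one iteration of A's for-loop (cs = list(reg_expr), p = (i, char))
def crushStepA (cs : List Char) (acc : List Char) (p : Int × Char) : List Char :=
  let i := p.1
  let char := p.2
  if char = 'e' then
    if i > 1 ∧ (PySem.List.pyGetD cs (i-1) '?' = '(' ∨ PySem.List.pyGetD cs (i-1) '?' = '+') then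
      if i < (cs.length : Int) - 1 ∧ (PySem.List.pyGetD cs (i+1) '?' = ')' ∨ PySem.List.pyGetD cs (i+1) '?' = '+') then
        acc ++ [char]
      else acc
    else acc
  else acc ++ [char]

def crush_epsilon (reg_expr : String) : String :=
  let cs := reg_expr.toList
  String.ofList ((PySem.List.enumerate cs 0).foldl (crushStepA cs) [])

-- ===== PORT B =====
-- one iteration of B's for-loop: state = (out so far, prev part); nxt = next part.
-- prev[-1:] in ("(", "+") is ported as getLast? (last char or none), nxt[:1] as head?.
def crushStepB (st : List Char × List Char) (nxt : List Char) : List Char × List Char :=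
  (st.1 ++
     (if (st.2.getLast? = some '(' ∨ st.2.getLast? = some '+') ∧
         (nxt.head? = some ')' ∨ nxt.head? = some '+') then ['e'] else []) ++ nxt,
   nxt)

def crush_epsilon_alt (reg_expr : String) : String :=
  let parts := PySem.Chars.splitOn reg_expr.toList ['e']
  let p0 := parts.headD []
  String.ofList (parts.tail.foldl crushStepB (p0, p0)).1

-- ===== PRECONDITION & SPEC =====
-- On strings whose char at index 1 is an 'e' preceded by '(' or '+' and followed by ')' or '+'
-- (e.g. "(e)"), A's guard 'i > 1' (where 'i >= 1' suffices for the i-1 lookup) drops that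
-- epsilon ("()"), while B keeps it ("(e)"), the intended value: A itself keeps the same
-- epsilon at every later position (e.g. in "a(e)").
def D_crush_epsilon (reg_expr : String) : Prop :=
  reg_expr.toList.getD 0 ' ' ∈ ['(', '+'] ∧ reg_expr.toList.getD 1 ' ' = 'e' ∧
  reg_expr.toList.getD 2 ' ' ∈ [')', '+']
instance (reg_expr : String) : Decidable (D_crush_epsilon reg_expr) := by
  unfold D_crush_epsilon; infer_instance

def Spec_crush_epsilon (reg_expr : String) (out : String) : Prop :=
  ¬ D_crush_epsilon reg_expr → out = crush_epsilon_alt reg_expr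
instance (reg_expr : String) (out : String) : Decidable (Spec_crush_epsilon reg_expr out) := by
  unfold Spec_crush_epsilon; infer_instance

def pvDiffWitness_crush_epsilon : String := "(e)"
def pvDiffWitnessOut_crush_epsilon : String × String := ("()", "(e)")

-- ===== CLAIM (what is proved, stated in full; the proofs are below) =====
def Claim_unchanged_crush_epsilon : Prop := ∀ (reg_expr : String), Dom_crush_epsilon reg_expr → Spec_crush_epsilon reg_expr (crush_epsilon reg_expr)
def Claim_changed_crush_epsilon : Prop := Dom_crush_epsilon (pvDiffWitness_crush_epsilon) ∧ D_crush_epsilon (pvDiffWitness_crush_epsilon) ∧ crush_epsilon (pvDiffWitness_crush_epsilon) = pvDiffWitnessOut_crush_epsilon.1 ∧ crush_epsilon_alt (pvDiffWitness_crush_epsilon) = pvDiffWitnessOut_crush_epsilon.2 ∧ pvDiffWitnessOut_crush_epsilon.1 ≠ pvDiffWitnessOut_crush_epsilon.2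
def Claim_exact_crush_epsilon : Prop := ∀ (reg_expr : String), Dom_crush_epsilon reg_expr → D_crush_epsilon reg_expr → crush_epsilon reg_expr ≠ crush_epsilon_alt reg_expr

-- ===== LEMMAS AND PROOFS =====

-- A's scan as a recursion carrying the current index and the previous character
def ago (pos : Nat) (prev : Char) : List Char → List Char
  | [] => []
  | c :: rest =>
    (if c ≠ 'e' ∨ (2 ≤ pos ∧ (prev = '(' ∨ prev = '+') ∧
        (rest.head? = some ')' ∨ rest.head? = some '+'))
     then [c] else []) ++ ago (pos+1) c rest

-- B's scan: same, but an existing previous character suffices (no index threshold)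
def bgo (prev : Char) : List Char → List Char
  | [] => []
  | c :: rest =>
    (if c ≠ 'e' ∨ ((prev = '(' ∨ prev = '+') ∧
        (rest.head? = some ')' ∨ rest.head? = some '+'))
     then [c] else []) ++ bgo c rest

-- split on 'e' as a simple structural recursion
def splitE : List Char → List (List Char)
  | [] => [[]]
  | c :: rest => if c = 'e' then [] :: splitE rest
                 else (c :: (splitE rest).headD []) :: (splitE rest).tail

-- prepend g to the first part
def mh (g : List Char) (ps : List (List Char)) : List (List Char) :=
  (g ++ ps.headD []) :: ps.tail

theorem splitE_ne_nil (l : List Char) : splitE l ≠ [] := by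
  cases l with
  | nil => simp [splitE]
  | cons c rest => simp only [splitE]; split <;> simp

theorem mh_nil (l : List Char) : mh [] (splitE l) = splitE l := by
  cases hsp : splitE l with
  | nil => exact absurd hsp (splitE_ne_nil l)
  | cons h t => simp [mh]

theorem ago_cons (pos : Nat) (prev c : Char) (rest : List Char) :
    ago pos prev (c :: rest) =
      (if c ≠ 'e' ∨ (2 ≤ pos ∧ (prev = '(' ∨ prev = '+') ∧
          (rest.head? = some ')' ∨ rest.head? = some '+')) then [c] else []) ++
        ago (pos+1) c rest := rfl

theorem bgo_cons (prev c : Char) (rest : List Char) :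
    bgo prev (c :: rest) =
      (if c ≠ 'e' ∨ ((prev = '(' ∨ prev = '+') ∧
          (rest.head? = some ')' ∨ rest.head? = some '+')) then [c] else []) ++
        bgo c rest := rfl

theorem go_e : ∀ (fuel : Nat) (l cur : List Char) (acc : List (List Char)), l.length < fuel →
    PySem.Chars.splitOn.go ['e'] fuel l cur acc = acc.reverse ++ mh cur.reverse (splitE l) := by
  intro fuel
  induction fuel with
  | zero => intro l cur acc h; omega
  | succ f ih =>
    intro l cur acc h
    cases l with
    | nil =>
      rw [PySem.Chars.splitOn.go.eq_def]
      simp [mh, splitE]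
    | cons c rest =>
      rw [PySem.Chars.splitOn.go.eq_def]
      simp only [List.length_cons] at h
      by_cases hc : c = 'e'
      · subst hc
        have hpre : List.isPrefixOf ['e'] ('e' :: rest) = true := by
          simp [List.isPrefixOf]
        simp only [hpre, if_true]
        rw [show List.drop (['e'] : List Char).length ('e' :: rest) = rest by simp]
        rw [ih rest [] _ (by omega), List.reverse_nil, mh_nil]
        simp [splitE, mh]
      · have hpre : List.isPrefixOf ['e'] (c :: rest) = false := by
          simp [List.isPrefixOf]
          exact fun hec => absurd hec.symm hc
        simp only [hpre, Bool.false_eq_true, if_false]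
        rw [ih rest (c :: cur) acc (by omega)]
        simp [splitE, mh, hc]

theorem splitOn_eq_splitE (l : List Char) : PySem.Chars.splitOn l ['e'] = splitE l := by
  unfold PySem.Chars.splitOn
  rw [go_e _ _ _ _ (by omega)]
  simp [mh_nil]

theorem bgo_efree : ∀ (h : List Char), (∀ c ∈ h, c ≠ 'e') → ∀ (prev : Char) (t : List Char),
    bgo prev (h ++ t) = h ++ bgo (h.getLastD prev) t := by
  intro h
  induction h with
  | nil => intro _ prev t; simp
  | cons c h' ih =>
    intro hh prev t
    have hc : c ≠ 'e' := hh c (by simp)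
    simp only [List.cons_append, bgo_cons, if_pos (Or.inl hc), List.getLastD_cons]
    rw [ih (fun x hx => hh x (by simp [hx])) c t]
    simp

theorem bgo_nil (prev : Char) : bgo prev [] = [] := rfl

theorem lastD_eq (p : List Char) (c : Char) (hc : c ≠ 'e') :
    (p.getLastD 'e' = c) ↔ (p.getLast? = some c) := by
  rw [List.getLastD_eq_getLast?]
  cases p.getLast? with
  | none => simp [Ne.symm hc]
  | some d => simp

theorem condB_iff (p : List Char) (o : Option Char) :
    (('e' : Char) ≠ 'e' ∨ ((p.getLastD 'e' = '(' ∨ p.getLastD 'e' = '+') ∧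
        (o = some ')' ∨ o = some '+'))) ↔
    ((p.getLast? = some '(' ∨ p.getLast? = some '+') ∧ (o = some ')' ∨ o = some '+')) := by
  rw [lastD_eq p '(' (by decide), lastD_eq p '+' (by decide)]
  simp

theorem head_append_e (g rest : List Char) :
    ((g ++ 'e' :: rest).head? = some ')' ∨ (g ++ 'e' :: rest).head? = some '+') ↔
    (g.head? = some ')' ∨ g.head? = some '+') := by
  cases g <;> simp

theorem splitE_prefix : ∀ (t : List Char), (∀ c ∈ t, c ≠ 'e') → ∀ (x : List Char),
    splitE (t ++ x) = mh t (splitE x) := by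
  intro t
  induction t with
  | nil => intro _ x; simp [mh_nil]
  | cons c t' ih =>
    intro ht x
    have hc : c ≠ 'e' := ht c (by simp)
    simp only [List.cons_append, splitE, if_neg hc]
    rw [ih (fun y hy => ht y (by simp [hy])) x]
    simp [mh]

theorem Lb : ∀ (r g out p : List Char), (∀ c ∈ g, c ≠ 'e') →
    ((mh g (splitE r)).foldl crushStepB (out, p)).1 =
      out ++ bgo (p.getLastD 'e') ('e' :: (g ++ r)) := by
  intro r
  induction r with
  | nil =>
    intro g out p hg
    have hge : bgo 'e' g = g := by simpa [bgo_nil] using bgo_efree g hg 'e' []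
    simp only [splitE, mh, List.headD, List.tail, List.append_nil, List.foldl_cons,
      List.foldl_nil, crushStepB]
    rw [bgo_cons, hge, if_congr (condB_iff p g.head?) rfl rfl]
    simp
  | cons c rest ih =>
    intro g out p hg
    by_cases hc : c = 'e'
    · subst hc
      have hsp : splitE ('e' :: rest) = [] :: splitE rest := by simp [splitE]
      rw [hsp]
      simp only [mh, List.headD, List.tail, List.append_nil, List.foldl_cons, crushStepB]
      rw [← mh_nil rest, ih [] _ _ (by intro x hx; simp at hx)]
      conv_rhs => rw [bgo_cons, bgo_efree g hg 'e' ('e' :: rest)]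
      have hcond : ((('e' : Char) ≠ 'e' ∨ ((p.getLastD 'e' = '(' ∨ p.getLastD 'e' = '+') ∧
          ((g ++ 'e' :: rest).head? = some ')' ∨ (g ++ 'e' :: rest).head? = some '+')))) ↔
          ((p.getLast? = some '(' ∨ p.getLast? = some '+') ∧
            (g.head? = some ')' ∨ g.head? = some '+')) := by
        rw [condB_iff, head_append_e]
      rw [if_congr hcond rfl rfl]
      simp
    · have hmh : mh g (splitE (c :: rest)) = mh (g ++ [c]) (splitE rest) := by
        simp [splitE, if_neg hc, mh]
      rw [hmh, ih (g ++ [c]) out p (by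
        intro x hx
        rcases List.mem_append.mp hx with h | h
        · exact hg x h
        · simp at h; subst h; exact hc)]
      simp

-- the two scans agree from index 2 on
theorem ago2_eq : ∀ (r : List Char) (pos : Nat) (prev : Char), 2 ≤ pos →
    ago pos prev r = bgo prev r := by
  intro r
  induction r with
  | nil => intro pos prev _; rfl
  | cons c rest ih =>
    intro pos prev h2
    simp only [ago_cons, bgo_cons, h2, true_and]
    rw [ih (pos+1) c (by omega)]

theorem A_eq_ago (cs : List Char) :
    ∀ (rest pre acc : List Char), cs = pre ++ rest →
      (PySem.List.enumerate rest (pre.length : Int)).foldl (crushStepA cs) acc =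
      acc ++ ago pre.length (pre.getLastD 'e') rest := by
  intro rest
  induction rest with
  | nil => intro pre acc _; simp [PySem.List.enumerate, ago]
  | cons c rest' ih =>
    intro pre acc hcs
    have hstep : crushStepA cs acc ((pre.length : Int), c) =
        acc ++ (if c ≠ 'e' ∨ (2 ≤ pre.length ∧
                  (pre.getLastD 'e' = '(' ∨ pre.getLastD 'e' = '+') ∧
                  (rest'.head? = some ')' ∨ rest'.head? = some '+'))
                then [c] else []) := by
      by_cases hc : c = 'e'
      swap
      · simp [crushStepA, hc]
      subst hc
      have hp1 : 1 ≤ pre.length →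
          PySem.List.pyGetD cs ((pre.length : Int) - 1) '?' = pre.getLastD 'e' := by
        intro h1
        rcases List.eq_nil_or_concat pre with rfl | ⟨q, x, rfl⟩
        · simp at h1
        · simp only [List.concat_eq_append] at hcs ⊢
          have hcast : ((q ++ [x]).length : Int) - 1 = ((q.length : Nat) : Int) := by
            push_cast [List.length_append, List.length_singleton]; omega
          rw [hcast, PySem.List.pyGetD_natCast, hcs, List.append_assoc]
          rw [List.getD_append_right _ _ _ _ (le_refl _)]
          simp
      have hlen : cs.length = pre.length + rest'.length + 1 := by
        subst hcs; simp; omega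
      have hnx : ∀ (d : Char) (t : List Char), rest' = d :: t →
          PySem.List.pyGetD cs ((pre.length : Int) + 1) '?' = d := by
        intro d t hdt
        have hcast : ((pre.length : Int)) + 1 = (((pre.length + 1 : Nat)) : Int) := by push_cast; ring
        rw [hcast, PySem.List.pyGetD_natCast, hcs]
        rw [show pre ++ 'e' :: rest' = (pre ++ ['e']) ++ rest' by simp]
        rw [List.getD_append_right _ _ _ _ (by simp)]
        have h0 : pre.length + 1 - (pre ++ ['e']).length = 0 := by simp
        rw [h0, hdt]
        simp [List.getD]
      simp only [crushStepA, ne_eq, not_true_eq_false, false_or, if_true]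
      by_cases hC : (2 ≤ pre.length ∧
          (pre.getLastD 'e' = '(' ∨ pre.getLastD 'e' = '+') ∧
          (rest'.head? = some ')' ∨ rest'.head? = some '+'))
      · rw [if_pos hC]
        obtain ⟨h2, hprev, hnext⟩ := hC
        cases hrest : rest' with
        | nil => subst hrest; simp at hnext
        | cons d t =>
          subst hrest
          simp only [List.head?_cons, Option.some.injEq] at hnext
          rw [if_pos ⟨by omega, by rw [hp1 (by omega)]; exact hprev⟩]
          rw [if_pos ⟨by simp only [List.length_cons] at hlen; push_cast [hlen]; omega,
            by rw [hnx d t rfl]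
               rcases hnext with h | h
               · exact Or.inl (by rw [h])
               · exact Or.inr (by rw [h])⟩]
      · rw [if_neg hC, List.append_nil]
        split_ifs with hg1 hg2
        · exfalso
          obtain ⟨hi1, hprev⟩ := hg1
          obtain ⟨hi2, hnext⟩ := hg2
          have h2 : 2 ≤ pre.length := by omega
          apply hC
          refine ⟨h2, by rw [← hp1 (by omega)]; exact hprev, ?_⟩
          cases hrest : rest' with
          | nil =>
            subst hrest
            simp only [List.length_nil] at hlen
            omega
          | cons d t =>
            subst hrest
            rw [hnx d t rfl] at hnext
            simpa using hnext
        · rfl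
        · rfl
    rw [PySem.List.enumerate_cons, List.foldl_cons, hstep]
    have hrec := ih (pre ++ [c]) (acc ++ (if c ≠ 'e' ∨ (2 ≤ pre.length ∧
                  (pre.getLastD 'e' = '(' ∨ pre.getLastD 'e' = '+') ∧
                  (rest'.head? = some ')' ∨ rest'.head? = some '+'))
                then [c] else [])) (by rw [hcs]; simp)
    have hlen' : (((pre ++ [c]).length : Nat) : Int) = (pre.length : Int) + 1 := by simp
    rw [hlen'] at hrec
    rw [hrec, List.getLastD_concat, show (pre ++ [c]).length = pre.length + 1 by simp]
    conv_rhs => rw [ago_cons]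
    rw [List.append_assoc]

theorem A_main (s : String) : crush_epsilon s = String.ofList (ago 0 'e' s.toList) := by
  have h := A_eq_ago s.toList s.toList [] [] (by simp)
  simp only [List.length_nil, Nat.cast_zero, List.getLastD_nil, List.nil_append] at h
  simp only [crush_epsilon]
  rw [h]

theorem dropWhile_head_false {p : Char → Bool} :
    ∀ (l : List Char) (x : Char) (xs : List Char), List.dropWhile p l = x :: xs → p x = false := by
  intro l
  induction l with
  | nil => intro x xs h; simp at h
  | cons a t ih =>
    intro x xs h
    rw [List.dropWhile_cons] at h
    by_cases hp : p a = true
    · rw [if_pos hp] at h; exact ih x xs h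
    · rw [if_neg hp] at h
      injection h with h1 _
      subst h1
      simpa using hp

theorem B_main (s : String) : crush_epsilon_alt s = String.ofList (bgo 'e' s.toList) := by
  simp only [crush_epsilon_alt]
  rw [splitOn_eq_splitE]
  have hsplit : List.takeWhile (fun c => c != 'e') s.toList ++
      List.dropWhile (fun c => c != 'e') s.toList = s.toList :=
    List.takeWhile_append_dropWhile
  set t := List.takeWhile (fun c => c != 'e') s.toList with ht
  have htf : ∀ c ∈ t, c ≠ 'e' := by
    intro c hc
    have := List.mem_takeWhile_imp hc
    simpa using this
  cases hd : List.dropWhile (fun c => c != 'e') s.toList with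
  | nil =>
    rw [hd, List.append_nil] at hsplit
    rw [← hsplit]
    have hsp : splitE t = [t] := by
      have := splitE_prefix t htf []
      simpa [mh, splitE] using this
    have hbt : bgo 'e' t = t := by simpa [bgo_nil] using bgo_efree t htf 'e' []
    rw [hsp, hbt]
    simp
  | cons c r =>
    have hc : c = 'e' := by
      have := dropWhile_head_false s.toList c r hd
      simpa using this
    subst hc
    rw [hd] at hsplit
    rw [← hsplit, splitE_prefix t htf ('e' :: r)]
    have hsp : splitE ('e' :: r) = [] :: splitE r := by simp [splitE]
    rw [hsp]
    simp only [mh, List.headD, List.tail, List.append_nil]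
    rw [← mh_nil r, Lb r [] t t (by intro x hx; simp at hx)]
    rw [bgo_efree t htf 'e' ('e' :: r)]
    simp

-- A's and B's scans agree on every list outside the D_ pattern
theorem main_eq : ∀ (l : List Char),
    ¬ (l.getD 0 ' ' ∈ ['(', '+'] ∧ l.getD 1 ' ' = 'e' ∧ l.getD 2 ' ' ∈ [')', '+']) →
    ago 0 'e' l = bgo 'e' l := by
  have e1 : ¬ (('e' : Char) = '(') := by decide
  have e2 : ¬ (('e' : Char) = '+') := by decide
  intro l hD
  rcases l with _ | ⟨c0, _ | ⟨c1, r⟩⟩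
  · rfl
  · by_cases hc : c0 = 'e' <;> simp [ago, bgo, hc, e1, e2]
  · rw [ago_cons, bgo_cons]
    have hA0 : (c0 ≠ 'e' ∨ (2 ≤ 0 ∧ (('e' : Char) = '(' ∨ ('e' : Char) = '+') ∧
        ((c1 :: r).head? = some ')' ∨ (c1 :: r).head? = some '+'))) ↔ c0 ≠ 'e' := by simp
    have hB0 : (c0 ≠ 'e' ∨ ((('e' : Char) = '(' ∨ ('e' : Char) = '+') ∧
        ((c1 :: r).head? = some ')' ∨ (c1 :: r).head? = some '+'))) ↔ c0 ≠ 'e' := by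
      simp [e1, e2]
    rw [if_congr hA0 rfl rfl, if_congr hB0 rfl rfl]
    congr 1
    rw [ago_cons, bgo_cons, ago2_eq r (0+1+1) c1 (by omega)]
    congr 1
    by_cases hc1 : c1 = 'e'
    · subst hc1
      rcases r with _ | ⟨c2, r'⟩
      · rw [if_neg (by
            rintro (h | ⟨h2', _⟩)
            · exact h rfl
            · omega),
          if_neg (by
            rintro (h | ⟨_, hb⟩)
            · exact h rfl
            · rcases hb with hb | hb <;> simp at hb)]
      · rw [if_neg (by
            rintro (h | ⟨h2', _⟩)
            · exact h rfl
            · omega),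
          if_neg (by
            rintro (h | ⟨ha, hb⟩)
            · exact h rfl
            · exact hD ⟨by simpa using ha, by simp, by simpa using hb⟩)]
    · simp [hc1]

theorem crush_epsilon_spec : Claim_unchanged_crush_epsilon := by
  intro s _ hD
  rw [A_main, B_main]
  exact congrArg String.ofList (main_eq s.toList hD)

theorem crush_epsilon_changed : Claim_changed_crush_epsilon := by
  unfold Claim_changed_crush_epsilon; decide

theorem crush_epsilon_tight : Claim_exact_crush_epsilon := by
  intro s _ hD
  obtain ⟨h0, h1, h2⟩ := hD
  rw [A_main, B_main]
  intro heq
  rw [String.ofList_inj] at heq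
  rcases hmatch : s.toList with _ | ⟨c0, _ | ⟨c1, _ | ⟨c2, r⟩⟩⟩ <;>
    rw [hmatch] at h0 h1 h2 heq
  · simp at h1
  · simp at h1
  · simp at h2
  · simp only [List.getD_cons_zero, List.getD_cons_succ, List.mem_cons,
      List.not_mem_nil, or_false] at h0 h1 h2
    have hc0 : c0 ≠ 'e' := by rcases h0 with h | h <;> subst h <;> decide
    subst h1
    have hA : ago 0 'e' (c0 :: 'e' :: c2 :: r) = c0 :: bgo 'e' (c2 :: r) := by
      rw [ago_cons, if_pos (Or.inl hc0), ago_cons,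
        if_neg (by
          rintro (h | ⟨h2', _⟩)
          · exact h rfl
          · omega),
        ago2_eq (c2 :: r) (0+1+1) 'e' (by omega)]
      simp
    have hB : bgo 'e' (c0 :: 'e' :: c2 :: r) = c0 :: 'e' :: bgo 'e' (c2 :: r) := by
      rw [bgo_cons, if_pos (Or.inl hc0), bgo_cons,
        if_pos (Or.inr ⟨h0, by
          rcases h2 with h | h
          · exact Or.inl (by simp [h])
          · exact Or.inr (by simp [h])⟩)]
      simp
    rw [hA, hB] at heq
    have hlen := congrArg List.length heq
    simp at hlen
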